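-- pv_equiv track=rewrite | github.com/noaprost/coding-test | b16953.py | solution
-- ===== SOURCE A (Python) =====
-- def solution(t):
--     midIdx = 12
--     moveCount = 0
--     idx = 0
--
--     aNum = t.count("A")
--     t = t.replace("A", "")
--
--     #커서의 이동 횟수
--     if(len(t) > 0):
--         curCount = len(t) - 1 + (aNum // 2)
--     else:
--         return 0
--     moveCount = moveCount + curCount
--
--     for i in range(len(t)):
--
--         idx = alphabet.index(t[i])
--
--         # 알파벳 이동 횟수를 더해주는 부분
--         if(idx <= 12):
--             moveCount = moveCount + idx
--         else:
--             moveCount = moveCount + (26 - idx)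
--
--     return moveCount
--
-- alphabet = ["A", "B", "C", "D", "E", "F", "G", "H", "I", "J", "K", "L", "M", "N", "O", "P", "Q", "R", "S", "T", "U", "V", "W", "X", "Y", "Z"]
-- ===== SOURCE B (Python) =====
-- alphabet = ["A", "B", "C", "D", "E", "F", "G", "H", "I", "J", "K", "L", "M",
--             "N", "O", "P", "Q", "R", "S", "T", "U", "V", "W", "X", "Y", "Z"]
--
--
-- def solution(t):
--     # Build a histogram of the characters, then total the cost letter-by-letter
--     # over the fixed alphabet instead of character-by-character over t.
--     freq = {}
--     for c in t:
--         freq[c] = freq.get(c, 0) + 1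
--     aNum = freq.get("A", 0)
--     moveSum = 0
--     rest = 0
--     for i in range(1, 26):
--         n = freq.get(alphabet[i], 0)
--         rest += n
--         moveSum += n * min(i, 26 - i)
--     if rest == 0:
--         return 0
--     return moveSum + rest - 1 + aNum // 2
-- ===== Notes on version B (the rewrite author's own statement) =====
-- stated objective: alternative
-- what changed: B builds a character-frequency histogram (dict) in one pass and then iterates over the 26 fixed alphabet positions, computing the cost as count*min(i,26-i) per letter and the cursor term from the histogram totals, instead of A's per-character index lookup over the A-stripped string.
import Mathlib
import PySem

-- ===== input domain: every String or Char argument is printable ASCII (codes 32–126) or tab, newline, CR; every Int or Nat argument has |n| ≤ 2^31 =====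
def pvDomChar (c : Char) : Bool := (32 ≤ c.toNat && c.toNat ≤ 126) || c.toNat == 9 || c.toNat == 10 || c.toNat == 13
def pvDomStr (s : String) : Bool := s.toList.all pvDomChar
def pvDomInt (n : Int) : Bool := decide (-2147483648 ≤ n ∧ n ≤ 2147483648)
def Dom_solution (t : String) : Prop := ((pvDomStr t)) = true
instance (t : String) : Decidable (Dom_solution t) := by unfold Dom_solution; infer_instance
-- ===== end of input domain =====

-- B replaces A's per-character cost scan (count, replace, loop over the mutated string) by a
-- character histogram plus one pass over the 26 alphabet positions (objective: alternative).


-- module-level constant shared by both Python files (A side keeps the string list)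
def alphabet : List String :=
  ["A", "B", "C", "D", "E", "F", "G", "H", "I", "J", "K", "L", "M",
   "N", "O", "P", "Q", "R", "S", "T", "U", "V", "W", "X", "Y", "Z"]

-- the same constant on the Char side (Python's 1-char strings are ported as Char)
def alphabetC : List Char :=
  ['A', 'B', 'C', 'D', 'E', 'F', 'G', 'H', 'I', 'J', 'K', 'L', 'M',
   'N', 'O', 'P', 'Q', 'R', 'S', 'T', 'U', 'V', 'W', 'X', 'Y', 'Z']

-- ===== PORT A =====
-- 'alphabet.index(c)' raises ValueError when c is not an uppercase letter; there the
-- port's '.getD 0' is junk and Pre_solution excludes the input.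
def solution (t : String) : Int :=
  let moveCount : Int := 0
  let aNum : Int := (PySem.Str.count t "A" : Int)
  let t2 := PySem.Str.replace t "A" ""
  if ((PySem.Str.len t2 : Int) > 0) then
    let curCount : Int := (PySem.Str.len t2 : Int) - 1 + PySem.Int.floordiv aNum 2
    let moveCount := moveCount + curCount
    (PySem.List.pyRange 0 (PySem.Str.len t2 : Int) 1).foldl
      (fun mc i =>
        let idx : Int :=
          ((PySem.List.index? alphabet
              (String.mk [PySem.List.pyGetD t2.toList i ' '])).getD 0 : Nat)
        if idx ≤ 12 then mc + idx else mc + (26 - idx))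
      moveCount
  else 0

-- ===== PORT B =====
def solution_alt (t : String) : Int :=
  let freq := t.toList.foldl
      (fun (d : PySem.Dict Char Int) c => d.insert c (d.getD c 0 + 1)) PySem.Dict.empty
  let aNum : Int := freq.getD 'A' 0
  let p := (PySem.List.pyRange 1 26 1).foldl
      (fun (p : Int × Int) i =>
        let n : Int := freq.getD (PySem.List.pyGetD alphabetC i ' ') 0
        (p.1 + n * min i (26 - i), p.2 + n))
      (0, 0)
  if p.2 = 0 then 0 else p.1 + p.2 - 1 + PySem.Int.floordiv aNum 2

-- ===== PRECONDITION & SPEC =====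
-- Python A raises ValueError (alphabet.index) as soon as the loop reaches a character
-- outside 'A'..'Z'; exactly those inputs are excluded.
def Pre_solution (t : String) : Prop := (t.toList.all (fun c => 65 ≤ c.toNat && c.toNat ≤ 90)) = true
instance (t : String) : Decidable (Pre_solution t) := by unfold Pre_solution; infer_instance
def pvWitness_solution : String := "BANANA"

def Spec_solution (t : String) (out : Int) : Prop := out = solution_alt t
instance (t : String) (out : Int) : Decidable (Spec_solution t out) := by unfold Spec_solution; infer_instance

-- ===== CLAIM (what is proved, stated in full; the proofs are below) =====
def Claim_equal_solution : Prop := ∀ (t : String), Dom_solution t → Pre_solution t → Spec_solution t (solution t)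

-- ===== LEMMAS AND PROOFS =====

-- the (total) index a character gets in A's port
def gIdx (c : Char) : Int := ((PySem.List.index? alphabet (String.mk [c])).getD 0 : Nat)

theorem gIdx_bounds (c : Char) : 0 ≤ gIdx c ∧ gIdx c ≤ 25 := by
  unfold gIdx
  rcases h : PySem.List.index? alphabet (String.mk [c]) with _ | k
  · simp
  · obtain ⟨hk, -, -⟩ := PySem.List.getElem_of_index?_eq_some h
    simp only [Option.getD_some]
    constructor
    · positivity
    · exact_mod_cast Nat.lt_succ_iff.mp (by simpa [alphabet] using hk)

theorem gIdx_A : gIdx 'A' = 0 := by decide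

-- count.go with a single-character needle counts that character
theorem countGo_single (a : Char) :
    ∀ (fuel : Nat) (l : List Char) (acc : Nat), l.length ≤ fuel →
      PySem.Chars.count.go [a] fuel l acc = acc + l.count a := by
  intro fuel
  induction fuel with
  | zero => intro l acc h; cases l <;> simp_all [PySem.Chars.count.go]
  | succ n ih =>
    intro l acc h
    cases l with
    | nil => simp [PySem.Chars.count.go]
    | cons c t =>
      by_cases hc : a = c
      · subst hc
        rw [PySem.Chars.count.go]
        simp only [List.isPrefixOf, Bool.and_true, beq_self_eq_true, if_true,
          List.length_cons, List.length_nil, List.drop_succ_cons, List.drop_zero]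
        rw [ih t (acc + 1) (by simpa using h)]
        simp
        omega
      · rw [PySem.Chars.count.go]
        simp only [List.isPrefixOf, Bool.and_true]
        rw [if_neg (by simp [hc])]
        rw [ih t acc (by simpa using h)]
        simp [Ne.symm hc]

-- replace.go with a single character and empty replacement is filter
theorem replaceGo_single (a : Char) :
    ∀ (fuel : Nat) (l : List Char) (acc : List Char), l.length ≤ fuel →
      PySem.Chars.replace.go [a] [] fuel l acc
        = acc.reverse ++ l.filter (fun c => c != a) := by
  intro fuel
  induction fuel with
  | zero => intro l acc h; cases l <;> simp_all [PySem.Chars.replace.go]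
  | succ n ih =>
    intro l acc h
    cases l with
    | nil => simp [PySem.Chars.replace.go]
    | cons c t =>
      by_cases hc : a = c
      · subst hc
        rw [PySem.Chars.replace.go]
        simp only [List.isPrefixOf, Bool.and_true, beq_self_eq_true, if_true,
          List.length_cons, List.length_nil, List.drop_succ_cons, List.drop_zero,
          List.reverse_nil, List.nil_append]
        rw [ih t acc (by simpa using h)]
        simp
      · rw [PySem.Chars.replace.go]
        simp only [List.isPrefixOf, Bool.and_true]
        rw [if_neg (by simp [hc])]
        rw [ih t (c :: acc) (by simpa using h)]
        simp [Ne.symm hc]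

theorem count_single (l : List Char) (a : Char) :
    PySem.Chars.count l [a] = l.count a := by
  unfold PySem.Chars.count
  simpa using countGo_single a l.length l 0 le_rfl

theorem replace_single (l : List Char) (a : Char) :
    PySem.Chars.replace l [a] [] = l.filter (fun c => c != a) := by
  unfold PySem.Chars.replace
  simpa using replaceGo_single a l.length l [] le_rfl

-- A's loop over the filtered characters, as a sum
def fA (c : Char) : Int := if gIdx c ≤ 12 then gIdx c else 26 - gIdx c

theorem loopA_sum (l : List Char) (m : Int) :
    l.foldl (fun mc c =>
        let idx : Int := ((PySem.List.index? alphabet (String.mk [c])).getD 0 : Nat)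
        if idx ≤ 12 then mc + idx else mc + (26 - idx)) m
      = m + (l.map fA).sum := by
  induction l generalizing m with
  | nil => simp
  | cons c t ih =>
    simp only [List.foldl_cons, List.map_cons, List.sum_cons, ih]
    unfold fA gIdx
    split_ifs <;> ring

theorem fA_eq_min (c : Char) : fA c = min (gIdx c) (26 - gIdx c) := by
  obtain ⟨h0, h25⟩ := gIdx_bounds c
  unfold fA
  rw [min_def]
  split_ifs <;> omega

theorem sum_filter_eq_sum_min (l : List Char) :
    ((l.filter (fun c => c != 'A')).map fA).sum
      = (l.map (fun c => min (gIdx c) (26 - gIdx c))).sum := by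
  induction l with
  | nil => simp
  | cons c t ih =>
    by_cases hc : c = 'A'
    · subst hc
      simp [ih, gIdx_A]
    · simp [hc, ih, fA_eq_min]

-- finite facts about the fixed 25-position scan, decided over the 26 letters
theorem hitW (k : Nat) (hk : k < 26) :
    ((PySem.List.pyRange 1 26 1).map
        (fun i => (if PySem.List.pyGetD alphabetC i ' ' = Char.ofNat (65 + k) then (1 : Int) else 0)
                    * min i (26 - i))).sum
      = if k = 0 then 0 else min (k : Int) (26 - (k : Int)) := by
  revert hk; revert k; decide

theorem hitOne (k : Nat) (hk : k < 26) :
    ((PySem.List.pyRange 1 26 1).map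
        (fun i => if PySem.List.pyGetD alphabetC i ' ' = Char.ofNat (65 + k) then (1 : Int) else 0)).sum
      = if k = 0 then 0 else 1 := by
  revert hk; revert k; decide

theorem gIdx_ofNat (k : Nat) (hk : k < 26) : gIdx (Char.ofNat (65 + k)) = (k : Int) := by
  revert hk; revert k; decide

theorem ofNat_eq_A_iff (k : Nat) (hk : k < 26) : Char.ofNat (65 + k) = 'A' ↔ k = 0 := by
  revert hk; revert k; decide

-- the two histogram sums of B equal A's per-character quantities, for A–Z strings
theorem hist_sums (l : List Char)
    (h : ∀ c ∈ l, 65 ≤ c.toNat ∧ c.toNat ≤ 90) :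
    ((PySem.List.pyRange 1 26 1).map
        (fun i => (l.count (PySem.List.pyGetD alphabetC i ' ') : Int) * min i (26 - i))).sum
      = (l.map (fun c => min (gIdx c) (26 - gIdx c))).sum
    ∧ ((PySem.List.pyRange 1 26 1).map
        (fun i => (l.count (PySem.List.pyGetD alphabetC i ' ') : Int))).sum
      = ((l.filter (fun c => c != 'A')).length : Int) := by
  induction l with
  | nil => simp
  | cons c t ih =>
    obtain ⟨ihW, ihC⟩ := ih (fun x hx => h x (List.mem_cons_of_mem _ hx))
    obtain ⟨h65, h90⟩ := h c (List.mem_cons_self ..)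
    set k : Nat := c.toNat - 65 with hkdef
    have hk : k < 26 := by omega
    have hc : c = Char.ofNat (65 + k) := by
      have : 65 + k = c.toNat := by omega
      rw [this, Char.ofNat_toNat]
    have hsplitW :
        ((PySem.List.pyRange 1 26 1).map
            (fun i => ((c :: t).count (PySem.List.pyGetD alphabetC i ' ') : Int) * min i (26 - i))).sum
          = ((PySem.List.pyRange 1 26 1).map
              (fun i => (t.count (PySem.List.pyGetD alphabetC i ' ') : Int) * min i (26 - i))).sum
            + ((PySem.List.pyRange 1 26 1).map
              (fun i => (if PySem.List.pyGetD alphabetC i ' ' = c then (1 : Int) else 0)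
                          * min i (26 - i))).sum := by
      rw [← PySem.List.sum_map_add_int]
      apply congrArg List.sum; apply List.map_congr_left; intro i _
      rw [List.count_cons]
      push_cast
      by_cases he : PySem.List.pyGetD alphabetC i ' ' = c
      · simp [he]; ring
      · simp [he, Ne.symm he]
    have hsplitC :
        ((PySem.List.pyRange 1 26 1).map
            (fun i => ((c :: t).count (PySem.List.pyGetD alphabetC i ' ') : Int))).sum
          = ((PySem.List.pyRange 1 26 1).map
              (fun i => (t.count (PySem.List.pyGetD alphabetC i ' ') : Int))).sum
            + ((PySem.List.pyRange 1 26 1).map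
              (fun i => if PySem.List.pyGetD alphabetC i ' ' = c then (1 : Int) else 0)).sum := by
      rw [← PySem.List.sum_map_add_int]
      apply congrArg List.sum; apply List.map_congr_left; intro i _
      rw [List.count_cons]
      push_cast
      by_cases he : PySem.List.pyGetD alphabetC i ' ' = c
      · simp [he]
      · simp [he, Ne.symm he]
    constructor
    · rw [hsplitW, ihW, hc, hitW k hk, List.map_cons, List.sum_cons, ← hc]
      by_cases h0 : k = 0
      · have hcA : c = 'A' := by rw [hc, (ofNat_eq_A_iff k hk).mpr h0]
        simp [h0, hcA, gIdx_A]
      · rw [if_neg h0, hc, gIdx_ofNat k hk]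
        ring
    · rw [hsplitC, ihC, hc, hitOne k hk, ← hc]
      by_cases h0 : k = 0
      · have hcA : c = 'A' := by rw [hc, (ofNat_eq_A_iff k hk).mpr h0]
        simp [h0, hcA]
      · have hcA : c ≠ 'A' := by
          rw [hc]; exact fun he => h0 ((ofNat_eq_A_iff k hk).mp he)
        rw [if_neg h0]
        simp [hcA]

-- ===== VERDICT (by name: the statement is the Claim_ definition above) =====
theorem solution_spec : Claim_equal_solution := by
  intro t _ hpre
  unfold Spec_solution solution solution_alt
  have hall : ∀ c ∈ t.toList, 65 ≤ c.toNat ∧ c.toNat ≤ 90 := by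
    intro c hc
    have := List.all_eq_true.mp hpre c hc
    simpa using this
  simp only [PySem.Str.len_eq, PySem.Str.count_eq]
  rw [show ("A" : String).toList = ['A'] from rfl]
  rw [show (PySem.Str.replace t "A" "").toList
        = t.toList.filter (fun c => c != 'A') from by
      simp [PySem.Str.toList_replace, replace_single]]
  rw [count_single]
  -- B's dict lookups are counts
  simp only [PySem.Dict.getD_foldl_insert_add_one, PySem.Dict.getD_empty, zero_add]
  -- B's paired loop is two sums
  rw [PySem.List.foldl_prod_mk
        (f := fun s i => s + (t.toList.count (PySem.List.pyGetD alphabetC i ' ') : Int) * min i (26 - i))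
        (g := fun s i => s + (t.toList.count (PySem.List.pyGetD alphabetC i ' ') : Int))]
  rw [PySem.List.foldl_add, PySem.List.foldl_add]
  simp only [zero_add]
  obtain ⟨hW, hC⟩ := hist_sums t.toList hall
  rw [hW, hC]
  set l := t.toList
  set F := l.filter (fun c => c != 'A') with hF
  by_cases hpos : ((F.length : Int) > 0)
  · rw [if_pos hpos]
    rw [PySem.List.foldl_pyRange_zero_pyGetD' F ' '
      (fun mc c =>
        let idx : Int := ((PySem.List.index? alphabet (String.mk [c])).getD 0 : Nat)
        if idx ≤ 12 then mc + idx else mc + (26 - idx))]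
    rw [loopA_sum, sum_filter_eq_sum_min]
    rw [if_neg (by omega)]
    ring
  · rw [if_neg hpos]
    rw [if_pos (by omega)]
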